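-- pv_equiv track=rewrite | github.com/naturalstupid/PyJHora | src/jhora/horoscope/chart/strength.py | _kendra_bala
-- ===== SOURCE A (Python) =====
-- kendras = lambda asc_house:[(asc_house+h-1)%12 for h in [1,4,7,10] ]
--
-- panapharas = lambda asc_house:[(asc_house+h-1)%12 for h in [2,5,8,11] ]
--
-- apoklimas = lambda asc_house:[(asc_house+h-1)%12 for h in [3,6,9,12] ]
--
-- def _kendra_bala(rasi_planet_positions):
--     kb = [0 for _ in range(7)]
--     asc_house = rasi_planet_positions[0][1][0]
--     for p,(h,_) in rasi_planet_positions[1:8]: #exclude 0th element Lagnam and Rahu/Ketu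
--         if h in kendras(asc_house):
--             kb[p] = 60
--         elif h in panapharas(asc_house):
--             kb[p] = 30
--         elif h in apoklimas(asc_house):
--             kb[p] = 15
--     return kb
-- ===== SOURCE B (Python) =====
-- def _kendra_bala(rasi_planet_positions):
--     asc_house = rasi_planet_positions[0][1][0]
--     kb = [0] * 7
--     for p, (h, _) in rasi_planet_positions[1:8]:
--         if 0 <= h < 12:
--             kb[p] = (60, 30, 15)[(h - asc_house) % 3]
--     return kb
-- ===== Notes on version B (the rewrite author's own statement) =====
-- stated objective: simpler
-- what changed: Replaces the three lambdas that build 4-element candidate-house lists and the three membership scans per planet by direct modular arithmetic: the category of house h is (h - asc_house) % 3 indexing (60, 30, 15), guarded by 0 <= h < 12 so out-of-range houses keep strength 0 as in A.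
import Mathlib
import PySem

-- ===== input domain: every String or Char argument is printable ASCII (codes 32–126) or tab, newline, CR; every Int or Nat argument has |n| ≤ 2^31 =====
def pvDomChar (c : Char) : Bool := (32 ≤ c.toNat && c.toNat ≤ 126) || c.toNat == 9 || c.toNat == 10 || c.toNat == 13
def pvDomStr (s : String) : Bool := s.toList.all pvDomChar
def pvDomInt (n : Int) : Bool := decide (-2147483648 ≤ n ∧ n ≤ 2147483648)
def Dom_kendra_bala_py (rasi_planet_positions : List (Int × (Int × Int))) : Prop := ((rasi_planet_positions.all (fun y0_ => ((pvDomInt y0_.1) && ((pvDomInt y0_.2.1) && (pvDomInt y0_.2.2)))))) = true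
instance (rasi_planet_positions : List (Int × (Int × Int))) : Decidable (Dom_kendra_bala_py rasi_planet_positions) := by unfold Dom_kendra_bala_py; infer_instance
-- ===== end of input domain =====

-- B replaces A's three candidate-list lambdas and membership scans by one modular
-- computation (h - asc_house) % 3 indexing (60, 30, 15); objective: simpler.


-- ===== PORT A =====
def pvKendras (asc_house : Int) : List Int :=
  [1, 4, 7, 10].map (fun h => PySem.Int.mod (asc_house + h - 1) 12)

def pvPanapharas (asc_house : Int) : List Int :=
  [2, 5, 8, 11].map (fun h => PySem.Int.mod (asc_house + h - 1) 12)

def pvApoklimas (asc_house : Int) : List Int :=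
  [3, 6, 9, 12].map (fun h => PySem.Int.mod (asc_house + h - 1) 12)

def kendra_bala_py (rasi_planet_positions : List (Int × (Int × Int))) : List Int :=
  let kb : List Int := List.replicate 7 0
  let asc_house : Int := (PySem.List.pyGetD rasi_planet_positions 0 (0, (0, 0))).2.1
  (PySem.List.slice rasi_planet_positions (some 1) (some 8)).foldl
    (fun kb x =>
      let p := x.1
      let h := x.2.1
      if h ∈ pvKendras asc_house then PySem.List.pySetD kb p 60
      else if h ∈ pvPanapharas asc_house then PySem.List.pySetD kb p 30
      else if h ∈ pvApoklimas asc_house then PySem.List.pySetD kb p 15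
      else kb) kb

-- ===== PORT B =====
def kendra_bala_py_alt (rasi_planet_positions : List (Int × (Int × Int))) : List Int :=
  let asc_house : Int := (PySem.List.pyGetD rasi_planet_positions 0 (0, (0, 0))).2.1
  (PySem.List.slice rasi_planet_positions (some 1) (some 8)).foldl
    (fun kb x =>
      if 0 ≤ x.2.1 ∧ x.2.1 < 12 then
        PySem.List.pySetD kb x.1
          (PySem.List.pyGetD [60, 30, 15] (PySem.Int.mod (x.2.1 - asc_house) 3) 0)
      else kb) (List.replicate 7 0)

-- ===== PRECONDITION & SPEC =====
-- Pre_ excludes exactly the inputs on which the Python raises IndexError: the empty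
-- list (no ascendant row), and any processed planet whose house is in 0..11 (so the
-- assignment kb[p] = … executes) while its planet index p is outside Python's valid
-- index range for the 7-element list kb.
def Pre_kendra_bala_py (rasi_planet_positions : List (Int × (Int × Int))) : Prop :=
  rasi_planet_positions ≠ [] ∧
  ∀ x ∈ PySem.List.slice rasi_planet_positions (some 1) (some 8),
    (0 ≤ x.2.1 ∧ x.2.1 < 12) → PySem.Raise.InRange 7 x.1

instance (rasi_planet_positions : List (Int × (Int × Int))) : Decidable (Pre_kendra_bala_py rasi_planet_positions) := by unfold Pre_kendra_bala_py; infer_instance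

def pvWitness_kendra_bala_py : (List (Int × (Int × Int))) := [(0, (1, 0)), (2, (4, 1)), (5, (11, 2))]

def Spec_kendra_bala_py (rasi_planet_positions : List (Int × (Int × Int))) (out : List Int) : Prop := out = kendra_bala_py_alt rasi_planet_positions
instance (rasi_planet_positions : List (Int × (Int × Int))) (out : List Int) : Decidable (Spec_kendra_bala_py rasi_planet_positions out) := by unfold Spec_kendra_bala_py; infer_instance

-- ===== CLAIM (what is proved, stated in full; the proofs are below) =====
def Claim_equal_kendra_bala_py : Prop := ∀ (rasi_planet_positions : List (Int × (Int × Int))), Dom_kendra_bala_py rasi_planet_positions → Pre_kendra_bala_py rasi_planet_positions → Spec_kendra_bala_py rasi_planet_positions (kendra_bala_py rasi_planet_positions)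

-- ===== LEMMAS AND PROOFS =====

-- The two loop bodies agree on every element and accumulator.
theorem pvStep_eq (asc p h : Int) (kb : List Int) :
    (if h ∈ pvKendras asc then PySem.List.pySetD kb p 60
     else if h ∈ pvPanapharas asc then PySem.List.pySetD kb p 30
     else if h ∈ pvApoklimas asc then PySem.List.pySetD kb p 15
     else kb)
    = (if 0 ≤ h ∧ h < 12 then
         PySem.List.pySetD kb p
           (PySem.List.pyGetD [60, 30, 15] (PySem.Int.mod (h - asc) 3) 0)
       else kb) := by
  have h12 : (0:Int) < 12 := by norm_num
  have h3 : (0:Int) < 3 := by norm_num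
  simp only [pvKendras, pvPanapharas, pvApoklimas, List.map, List.mem_cons,
    List.not_mem_nil, or_false, PySem.Int.mod_eq_emod_of_pos h12,
    PySem.Int.mod_eq_emod_of_pos h3]
  by_cases hr : 0 ≤ h ∧ h < 12
  · have hm : (h - asc) % 3 = 0 ∨ (h - asc) % 3 = 1 ∨ (h - asc) % 3 = 2 := by omega
    rcases hm with hm | hm | hm <;> rw [hm]
    · rw [if_pos (by omega), if_pos hr]
      rfl
    · rw [if_neg (by omega), if_pos (by omega), if_pos hr]
      rfl
    · rw [if_neg (by omega), if_neg (by omega), if_pos (by omega), if_pos hr]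
      rfl
  · rw [if_neg (by omega), if_neg (by omega), if_neg (by omega), if_neg hr]

theorem pv_ports_eq (rasi_planet_positions : List (Int × (Int × Int))) :
    kendra_bala_py rasi_planet_positions = kendra_bala_py_alt rasi_planet_positions := by
  unfold kendra_bala_py kendra_bala_py_alt
  simp only [pvStep_eq]

-- ===== VERDICT (by name: the statement is the Claim_ definition above) =====
theorem kendra_bala_py_spec : Claim_equal_kendra_bala_py := by
  intro rpp _ _
  exact pv_ports_eq rpp
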